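-- pv_equiv track=rewrite | github.com/lgomezm/advent-of-code | day6/day6-1.py | find_max_coordinates
-- ===== SOURCE A (Python) =====
-- def find_max_coordinates(coordinates):
--     max_x = coordinates[0][0]
--     max_y = coordinates[0][1]
--     for coord in coordinates:
--         if coord[0] > max_x:
--             max_x = coord[0]
--         if coord[1] > max_y:
--             max_y = coord[1]
--     return (max_x, max_y)
-- ===== SOURCE B (Python) =====
-- def find_max_coordinates(coordinates):
--     if len(coordinates) == 1:
--         return coordinates[0]
--     mid = len(coordinates) // 2
--     lx, ly = find_max_coordinates(coordinates[:mid])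
--     rx, ry = find_max_coordinates(coordinates[mid:])
--     return (max(lx, rx), max(ly, ry))
-- ===== Notes on version B (the rewrite author's own statement) =====
-- stated objective: alternative
-- what changed: Replaces A's single fused compare-and-update scan by a divide-and-conquer recursion that splits the list in half, recursively takes the maxima of each half, and merges them with max.
import Mathlib
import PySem

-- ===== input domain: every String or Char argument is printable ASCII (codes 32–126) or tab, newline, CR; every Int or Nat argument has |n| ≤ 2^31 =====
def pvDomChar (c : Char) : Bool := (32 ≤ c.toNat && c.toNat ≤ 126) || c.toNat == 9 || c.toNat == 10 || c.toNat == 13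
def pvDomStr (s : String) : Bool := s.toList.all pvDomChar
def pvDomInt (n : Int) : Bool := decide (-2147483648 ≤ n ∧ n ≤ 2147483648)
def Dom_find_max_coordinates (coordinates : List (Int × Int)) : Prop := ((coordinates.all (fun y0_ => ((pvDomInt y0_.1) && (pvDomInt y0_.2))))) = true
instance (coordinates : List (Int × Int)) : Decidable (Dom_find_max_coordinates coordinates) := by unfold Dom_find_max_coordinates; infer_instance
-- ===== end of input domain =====

-- B replaces A's single fused compare-and-update scan by a divide-and-conquer recursion
-- (split in half, recurse, merge with max); objective: alternative. Both Pythons raise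
-- on the empty list (A: IndexError, B: RecursionError), so Pre_ requires a nonempty list.

-- ===== PORT A =====
def find_max_coordinates (coordinates : List (Int × Int)) : Int × Int :=
  match coordinates with
  | [] => (0, 0)  -- Python raises IndexError here; excluded by Pre_
  | c0 :: _ =>
    coordinates.foldl
      (fun s coord =>
        (if coord.1 > s.1 then coord.1 else s.1,
         if coord.2 > s.2 then coord.2 else s.2))
      (c0.1, c0.2)

-- ===== PORT B =====
-- coordinates[:mid] / coordinates[mid:] with 0 ≤ mid ≤ len are exactly take/drop.
-- The Nat fuel (initialised to the list length) is only a structural totality guard for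
-- the divide-and-conquer recursion; it never changes the computed value (fuel 0 is
-- reached only on [], where Python never returns — RecursionError, excluded by Pre_).
def fmcGo : Nat → List (Int × Int) → Int × Int
  | 0, _ => (0, 0)
  | Nat.succ n, l =>
    if l.length = 1 then
      l.headD (0, 0)
    else if l = [] then
      (0, 0)
    else
      let mid := l.length / 2
      let a := fmcGo n (l.take mid)
      let b := fmcGo n (l.drop mid)
      (max a.1 b.1, max a.2 b.2)

def find_max_coordinates_alt (coordinates : List (Int × Int)) : Int × Int :=
  fmcGo coordinates.length coordinates

-- ===== PRECONDITION & SPEC =====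
-- Pre_ excludes exactly the empty list, on which both Pythons raise.
def Pre_find_max_coordinates (coordinates : List (Int × Int)) : Prop := coordinates ≠ []
instance (coordinates : List (Int × Int)) : Decidable (Pre_find_max_coordinates coordinates) := by unfold Pre_find_max_coordinates; infer_instance
def pvWitness_find_max_coordinates : (List (Int × Int)) := [(1, 5), (3, 2)]

def Spec_find_max_coordinates (coordinates : List (Int × Int)) (out : Int × Int) : Prop := out = find_max_coordinates_alt coordinates
instance (coordinates : List (Int × Int)) (out : Int × Int) : Decidable (Spec_find_max_coordinates coordinates out) := by unfold Spec_find_max_coordinates; infer_instance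

-- ===== CLAIM (what is proved, stated in full; the proofs are below) =====
def Claim_equal_find_max_coordinates : Prop := ∀ (coordinates : List (Int × Int)), Dom_find_max_coordinates coordinates → Pre_find_max_coordinates coordinates → Spec_find_max_coordinates coordinates (find_max_coordinates coordinates)

-- ===== LEMMAS AND PROOFS =====

/-- Max of a nonempty list under a projection (0 on []): the common characterisation. -/
def fmcMax (f : Int × Int → Int) : List (Int × Int) → Int
  | [] => 0
  | h :: t => t.foldl (fun m c => max m (f c)) (f h)

theorem fmc_foldl_max_max (f : Int × Int → Int) (t : List (Int × Int)) (x b : Int) :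
    max x (t.foldl (fun m c => max m (f c)) b)
      = t.foldl (fun m c => max m (f c)) (max x b) := by
  induction t generalizing b with
  | nil => rfl
  | cons h s ih =>
    simp only [List.foldl_cons]
    rw [ih]
    congr 1
    omega

theorem fmcMax_append (f : Int × Int → Int) (l₁ l₂ : List (Int × Int))
    (h₁ : l₁ ≠ []) (h₂ : l₂ ≠ []) :
    fmcMax f (l₁ ++ l₂) = max (fmcMax f l₁) (fmcMax f l₂) := by
  match l₁, l₂ with
  | a :: t₁, b :: t₂ =>
    simp only [fmcMax, List.cons_append, List.foldl_append, List.foldl_cons]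
    rw [fmc_foldl_max_max]

theorem fmc_A_eq (l : List (Int × Int)) (h : l ≠ []) :
    find_max_coordinates l = (fmcMax Prod.fst l, fmcMax Prod.snd l) := by
  match l with
  | c0 :: t =>
    unfold find_max_coordinates
    simp only [List.foldl_cons]
    have key : ∀ (s : List (Int × Int)) (a b : Int),
        s.foldl (fun st coord =>
          (if coord.1 > st.1 then coord.1 else st.1,
           if coord.2 > st.2 then coord.2 else st.2)) (a, b)
        = (s.foldl (fun m c => max m c.1) a, s.foldl (fun m c => max m c.2) b) := by
      intro s
      induction s with
      | nil => intro a b; rfl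
      | cons h t ih =>
        intro a b
        simp only [List.foldl_cons]
        rw [ih]
        congr 1 <;> congr 1 <;> omega
    rw [key]
    simp only [fmcMax]
    congr 1 <;> congr 1 <;> omega

theorem fmc_B_eq_aux (n : Nat) : ∀ (l : List (Int × Int)), l.length ≤ n → l ≠ [] →
    fmcGo n l = (fmcMax Prod.fst l, fmcMax Prod.snd l) := by
  induction n with
  | zero =>
    intro l hn h
    cases l with
    | nil => exact absurd rfl h
    | cons a t => simp at hn
  | succ n ih =>
    intro l hn h
    by_cases h1 : l.length = 1
    · simp only [fmcGo, h1, if_true]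
      match l, h1 with
      | [c], _ => rfl
    · simp only [fmcGo, h1, if_false, h, if_false]
      have hlen : l.length ≥ 2 := by
        cases l with
        | nil => exact absurd rfl h
        | cons a t => cases t with
          | nil => simp at h1
          | cons b s => simp
      set mid := l.length / 2 with hmid
      have hm1 : 1 ≤ mid := by omega
      have hm2 : mid < l.length := by omega
      have htne : l.take mid ≠ [] := by
        intro he
        have := congrArg List.length he
        rw [List.length_take] at this
        simp only [List.length_nil] at this
        omega
      have hdne : l.drop mid ≠ [] := by
        intro he
        have := congrArg List.length he
        rw [List.length_drop] at this
        simp only [List.length_nil] at this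
        omega
      have ht := ih (l.take mid) (by simp [List.length_take]; omega) htne
      have hd := ih (l.drop mid) (by simp [List.length_drop]; omega) hdne
      simp only [ht, hd]
      conv_rhs => rw [show l = l.take mid ++ l.drop mid from (List.take_append_drop mid l).symm]
      rw [fmcMax_append _ _ _ htne hdne, fmcMax_append _ _ _ htne hdne]

theorem fmc_B_eq (l : List (Int × Int)) (h : l ≠ []) :
    find_max_coordinates_alt l = (fmcMax Prod.fst l, fmcMax Prod.snd l) :=
  fmc_B_eq_aux l.length l (le_refl _) h

-- ===== VERDICT (by name: the statement is the Claim_ definition above) =====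
theorem find_max_coordinates_spec : Claim_equal_find_max_coordinates := by
  intro l _ hpre
  unfold Spec_find_max_coordinates
  rw [fmc_A_eq l hpre, fmc_B_eq l hpre]
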